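-- pv_equiv track=rewrite | github.com/stian-liza/multicell-state-dynamics | scripts/run_scp2154_stromal_to_hepatocyte_coupling.py | annotate_program
-- ===== SOURCE A (Python) =====
-- def annotate_program(cell_type: str, genes: list[str]) -> str:
--     gene_set = {gene.upper() for gene in genes}
--     if {"ACTA2", "TAGLN", "MYL9"} & gene_set and {"CALD1", "TPM2", "IGFBP7", "VIM"} & gene_set:
--         return "myofibroblast_contractile_ecm"
--     if {"COL1A1", "COL1A2", "COL3A1", "DCN", "LUM"} & gene_set:
--         return "matrix_fibroblast_ecm"
--     if {"SAA1", "SAA2", "HP", "ORM1", "SERPINA1", "FGA", "FGB"} & gene_set: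
--         return "acute_phase_inflammatory_secretory"
--     if {"CYP3A5", "CYP2A7", "SLC22A7", "MLXIPL", "APOB", "FTCD"} & gene_set:
--         return "mature_hepatocyte_metabolic_transport"
--     if {"HLA-A", "HLA-B", "HLA-C", "SRGN", "IL32", "TMSB10", "TMSB4X"} & gene_set:
--         return "immune_mhc_inflammatory_or_doublet"
--     if {"IGKC", "JCHAIN", "IGHG1", "IGHA1"} & gene_set:
--         return "b_cell_plasma_or_ambient_signal"
--     if {"ALB", "APOA1", "APOA2", "APOC3", "TTR", "RBP4", "AMBP"} & gene_set:
--         return "hepatocyte_secretory_metabolic"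
--     return f"{cell_type.lower()}_mixed_program"
-- ===== SOURCE B (Python) =====
-- _LABELS = [
--     "myofibroblast_contractile_ecm",
--     "matrix_fibroblast_ecm",
--     "acute_phase_inflammatory_secretory",
--     "mature_hepatocyte_metabolic_transport",
--     "immune_mhc_inflammatory_or_doublet",
--     "b_cell_plasma_or_ambient_signal",
--     "hepatocyte_secretory_metabolic",
-- ]
--
-- # Inverted marker index: gene -> priority code.
-- # Codes 0 and 1 are the two halves of the myofibroblast conjunction (label 0);
-- # codes 2..7 are the single-group rules, label index = code - 1.
-- _CODE = {}
-- for _g in ("ACTA2", "TAGLN", "MYL9"):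
--     _CODE[_g] = 0
-- for _g in ("CALD1", "TPM2", "IGFBP7", "VIM"):
--     _CODE[_g] = 1
-- for _g in ("COL1A1", "COL1A2", "COL3A1", "DCN", "LUM"):
--     _CODE[_g] = 2
-- for _g in ("SAA1", "SAA2", "HP", "ORM1", "SERPINA1", "FGA", "FGB"):
--     _CODE[_g] = 3
-- for _g in ("CYP3A5", "CYP2A7", "SLC22A7", "MLXIPL", "APOB", "FTCD"):
--     _CODE[_g] = 4
-- for _g in ("HLA-A", "HLA-B", "HLA-C", "SRGN", "IL32", "TMSB10", "TMSB4X"):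
--     _CODE[_g] = 5
-- for _g in ("IGKC", "JCHAIN", "IGHG1", "IGHA1"):
--     _CODE[_g] = 6
-- for _g in ("ALB", "APOA1", "APOA2", "APOC3", "TTR", "RBP4", "AMBP"):
--     _CODE[_g] = 7
--
--
-- def annotate_program(cell_type: str, genes: list[str]) -> str:
--     # Single pass: look each gene up in the inverted index and keep the best
--     # (lowest) single-rule priority seen, plus flags for the two conjunction halves.
--     m1 = False
--     m2 = False
--     best = 8
--     for gene in genes:
--         c = _CODE.get(gene.upper())
--         if c is None:
--             continue
--         if c == 0:
--             m1 = True
--         elif c == 1: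
--             m2 = True
--         elif c < best:
--             best = c
--     if m1 and m2:
--         return _LABELS[0]
--     if best < 8:
--         return _LABELS[best - 1]
--     return f"{cell_type.lower()}_mixed_program"
-- ===== Notes on version B (the rewrite author's own statement) =====
-- stated objective: alternative
-- what changed: Replaced A's ordered chain of seven per-rule set intersections with an inverted index (marker gene -> priority code) consulted once per gene in a single pass that keeps two conjunction flags and the minimum single-rule priority.
import Mathlib
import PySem

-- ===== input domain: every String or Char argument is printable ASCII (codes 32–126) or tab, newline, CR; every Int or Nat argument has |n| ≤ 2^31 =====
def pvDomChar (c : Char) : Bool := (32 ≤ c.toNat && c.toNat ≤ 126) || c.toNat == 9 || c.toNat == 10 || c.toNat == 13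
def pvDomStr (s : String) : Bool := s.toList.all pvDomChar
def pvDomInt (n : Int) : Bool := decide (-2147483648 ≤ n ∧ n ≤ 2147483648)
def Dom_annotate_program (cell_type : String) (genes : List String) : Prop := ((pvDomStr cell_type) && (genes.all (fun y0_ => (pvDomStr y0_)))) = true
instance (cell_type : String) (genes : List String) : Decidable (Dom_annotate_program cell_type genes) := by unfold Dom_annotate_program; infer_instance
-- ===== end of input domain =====

-- B replaces A's chain of per-rule set intersections by an inverted marker index
-- (gene -> priority code) and a single pass keeping the minimum priority (objective: alternative).

-- ===== PORT A =====
-- nonempty intersection of a literal gene set with gene_set (Python truthiness of `{...} & gene_set`)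
def pvHit (lits : List String) (gs : PySem.Set String) : Bool :=
  !(PySem.Set.inter (PySem.Set.ofList lits) gs).isEmpty

def annotate_program (cell_type : String) (genes : List String) : String :=
  let gene_set : PySem.Set String := PySem.Set.ofList (genes.map PySem.Str.upper)
  if pvHit ["ACTA2", "TAGLN", "MYL9"] gene_set && pvHit ["CALD1", "TPM2", "IGFBP7", "VIM"] gene_set then
    "myofibroblast_contractile_ecm"
  else if pvHit ["COL1A1", "COL1A2", "COL3A1", "DCN", "LUM"] gene_set then
    "matrix_fibroblast_ecm"
  else if pvHit ["SAA1", "SAA2", "HP", "ORM1", "SERPINA1", "FGA", "FGB"] gene_set then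
    "acute_phase_inflammatory_secretory"
  else if pvHit ["CYP3A5", "CYP2A7", "SLC22A7", "MLXIPL", "APOB", "FTCD"] gene_set then
    "mature_hepatocyte_metabolic_transport"
  else if pvHit ["HLA-A", "HLA-B", "HLA-C", "SRGN", "IL32", "TMSB10", "TMSB4X"] gene_set then
    "immune_mhc_inflammatory_or_doublet"
  else if pvHit ["IGKC", "JCHAIN", "IGHG1", "IGHA1"] gene_set then
    "b_cell_plasma_or_ambient_signal"
  else if pvHit ["ALB", "APOA1", "APOA2", "APOC3", "TTR", "RBP4", "AMBP"] gene_set then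
    "hepatocyte_secretory_metabolic"
  else
    PySem.Str.lower cell_type ++ "_mixed_program"

-- ===== PORT B =====
def pvLabels : List String :=
  [ "myofibroblast_contractile_ecm",
    "matrix_fibroblast_ecm",
    "acute_phase_inflammatory_secretory",
    "mature_hepatocyte_metabolic_transport",
    "immune_mhc_inflammatory_or_doublet",
    "b_cell_plasma_or_ambient_signal",
    "hepatocyte_secretory_metabolic" ]

-- _CODE: the module-level loops building the inverted index, as foldl-inserts
def pvCODE : PySem.Dict String Int :=
  let d := PySem.Dict.empty
  let d := (["ACTA2", "TAGLN", "MYL9"] : List String).foldl (fun d g => d.insert g 0) d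
  let d := (["CALD1", "TPM2", "IGFBP7", "VIM"] : List String).foldl (fun d g => d.insert g 1) d
  let d := (["COL1A1", "COL1A2", "COL3A1", "DCN", "LUM"] : List String).foldl (fun d g => d.insert g 2) d
  let d := (["SAA1", "SAA2", "HP", "ORM1", "SERPINA1", "FGA", "FGB"] : List String).foldl (fun d g => d.insert g 3) d
  let d := (["CYP3A5", "CYP2A7", "SLC22A7", "MLXIPL", "APOB", "FTCD"] : List String).foldl (fun d g => d.insert g 4) d
  let d := (["HLA-A", "HLA-B", "HLA-C", "SRGN", "IL32", "TMSB10", "TMSB4X"] : List String).foldl (fun d g => d.insert g 5) d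
  let d := (["IGKC", "JCHAIN", "IGHG1", "IGHA1"] : List String).foldl (fun d g => d.insert g 6) d
  let d := (["ALB", "APOA1", "APOA2", "APOC3", "TTR", "RBP4", "AMBP"] : List String).foldl (fun d g => d.insert g 7) d
  d

-- loop body of B's single pass; state = (m1, m2, best)
def pvStep (st : Bool × Bool × Int) (gene : String) : Bool × Bool × Int :=
  match pvCODE.get? (PySem.Str.upper gene) with
  | none => st
  | some c =>
    if c = 0 then (true, st.2.1, st.2.2)
    else if c = 1 then (st.1, true, st.2.2)
    else if c < st.2.2 then (st.1, st.2.1, c)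
    else st

def annotate_program_alt (cell_type : String) (genes : List String) : String :=
  let st := genes.foldl pvStep (false, false, 8)
  if st.1 && st.2.1 then
    (PySem.List.pyGet? pvLabels 0).getD ""   -- index always in range
  else if st.2.2 < 8 then
    (PySem.List.pyGet? pvLabels (st.2.2 - 1)).getD ""   -- best ∈ [2,7]: index always in range
  else
    PySem.Str.lower cell_type ++ "_mixed_program"

-- ===== PRECONDITION & SPEC =====
def Spec_annotate_program (cell_type : String) (genes : List String) (out : String) : Prop := out = annotate_program_alt cell_type genes
instance (cell_type : String) (genes : List String) (out : String) : Decidable (Spec_annotate_program cell_type genes out) := by unfold Spec_annotate_program; infer_instance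

-- ===== CLAIM (what is proved, stated in full; the proofs are below) =====
def Claim_equal_annotate_program : Prop := ∀ (cell_type : String) (genes : List String), Dom_annotate_program cell_type genes → Spec_annotate_program cell_type genes (annotate_program cell_type genes)

-- ===== LEMMAS AND PROOFS =====
def pvG0a : List String := ["ACTA2", "TAGLN", "MYL9"]
def pvG0b : List String := ["CALD1", "TPM2", "IGFBP7", "VIM"]
def pvG1 : List String := ["COL1A1", "COL1A2", "COL3A1", "DCN", "LUM"]
def pvG2 : List String := ["SAA1", "SAA2", "HP", "ORM1", "SERPINA1", "FGA", "FGB"]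
def pvG3 : List String := ["CYP3A5", "CYP2A7", "SLC22A7", "MLXIPL", "APOB", "FTCD"]
def pvG4 : List String := ["HLA-A", "HLA-B", "HLA-C", "SRGN", "IL32", "TMSB10", "TMSB4X"]
def pvG5 : List String := ["IGKC", "JCHAIN", "IGHG1", "IGHA1"]
def pvG6 : List String := ["ALB", "APOA1", "APOA2", "APOC3", "TTR", "RBP4", "AMBP"]

def pvAny (lits : List String) (genes : List String) : Bool :=
  genes.any (fun g => decide (PySem.Str.upper g ∈ lits))

def pvCmin (genes : List String) : Int :=
  if pvAny pvG1 genes then 2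
  else if pvAny pvG2 genes then 3
  else if pvAny pvG3 genes then 4
  else if pvAny pvG4 genes then 5
  else if pvAny pvG5 genes then 6
  else if pvAny pvG6 genes then 7
  else 8

def pvSt (l : List String) : Bool × Bool × Int :=
  (pvAny pvG0a l, pvAny pvG0b l, pvCmin l)

theorem pvAny_append (lits : List String) (l : List String) (g : String) :
    pvAny lits (l ++ [g]) = (pvAny lits l || decide (PySem.Str.upper g ∈ lits)) := by
  simp [pvAny]

set_option maxRecDepth 8000 in
set_option maxHeartbeats 1600000 in
theorem pvCODE_get (u : String) : pvCODE.get? u =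
    if u ∈ pvG0a then some 0
    else if u ∈ pvG0b then some 1
    else if u ∈ pvG1 then some 2
    else if u ∈ pvG2 then some 3
    else if u ∈ pvG3 then some 4
    else if u ∈ pvG4 then some 5
    else if u ∈ pvG5 then some 6
    else if u ∈ pvG6 then some 7
    else none := by
  have h : pvCODE = PySem.Dict.mk [("ACTA2", 0), ("TAGLN", 0), ("MYL9", 0), ("CALD1", 1), ("TPM2", 1), ("IGFBP7", 1), ("VIM", 1), ("COL1A1", 2), ("COL1A2", 2), ("COL3A1", 2), ("DCN", 2), ("LUM", 2), ("SAA1", 3), ("SAA2", 3), ("HP", 3), ("ORM1", 3), ("SERPINA1", 3), ("FGA", 3), ("FGB", 3), ("CYP3A5", 4), ("CYP2A7", 4), ("SLC22A7", 4), ("MLXIPL", 4), ("APOB", 4), ("FTCD", 4), ("HLA-A", 5), ("HLA-B", 5), ("HLA-C", 5), ("SRGN", 5), ("IL32", 5), ("TMSB10", 5), ("TMSB4X", 5), ("IGKC", 6), ("JCHAIN", 6), ("IGHG1", 6), ("IGHA1", 6), ("ALB", 7), ("APOA1", 7), ("APOA2", 7), ("APOC3", 7), ("TTR", 7), ("RBP4",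 7), ("AMBP", 7)] := by decide
  rw [h]
  simp only [pvG0a, pvG0b, pvG1, pvG2, pvG3, pvG4, pvG5, pvG6]
  by_cases e0 : u = "ACTA2"
  · subst e0; decide
  by_cases e1 : u = "TAGLN"
  · subst e1; decide
  by_cases e2 : u = "MYL9"
  · subst e2; decide
  by_cases e3 : u = "CALD1"
  · subst e3; decide
  by_cases e4 : u = "TPM2"
  · subst e4; decide
  by_cases e5 : u = "IGFBP7"
  · subst e5; decide
  by_cases e6 : u = "VIM"
  · subst e6; decide
  by_cases e7 : u = "COL1A1"
  · subst e7; decide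
  by_cases e8 : u = "COL1A2"
  · subst e8; decide
  by_cases e9 : u = "COL3A1"
  · subst e9; decide
  by_cases e10 : u = "DCN"
  · subst e10; decide
  by_cases e11 : u = "LUM"
  · subst e11; decide
  by_cases e12 : u = "SAA1"
  · subst e12; decide
  by_cases e13 : u = "SAA2"
  · subst e13; decide
  by_cases e14 : u = "HP"
  · subst e14; decide
  by_cases e15 : u = "ORM1"
  · subst e15; decide
  by_cases e16 : u = "SERPINA1"
  · subst e16; decide
  by_cases e17 : u = "FGA"
  · subst e17; decide
  by_cases e18 : u = "FGB"
  · subst e18; decide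
  by_cases e19 : u = "CYP3A5"
  · subst e19; decide
  by_cases e20 : u = "CYP2A7"
  · subst e20; decide
  by_cases e21 : u = "SLC22A7"
  · subst e21; decide
  by_cases e22 : u = "MLXIPL"
  · subst e22; decide
  by_cases e23 : u = "APOB"
  · subst e23; decide
  by_cases e24 : u = "FTCD"
  · subst e24; decide
  by_cases e25 : u = "HLA-A"
  · subst e25; decide
  by_cases e26 : u = "HLA-B"
  · subst e26; decide
  by_cases e27 : u = "HLA-C"
  · subst e27; decide
  by_cases e28 : u = "SRGN"
  · subst e28; decide
  by_cases e29 : u = "IL32"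
  · subst e29; decide
  by_cases e30 : u = "TMSB10"
  · subst e30; decide
  by_cases e31 : u = "TMSB4X"
  · subst e31; decide
  by_cases e32 : u = "IGKC"
  · subst e32; decide
  by_cases e33 : u = "JCHAIN"
  · subst e33; decide
  by_cases e34 : u = "IGHG1"
  · subst e34; decide
  by_cases e35 : u = "IGHA1"
  · subst e35; decide
  by_cases e36 : u = "ALB"
  · subst e36; decide
  by_cases e37 : u = "APOA1"
  · subst e37; decide
  by_cases e38 : u = "APOA2"
  · subst e38; decide
  by_cases e39 : u = "APOC3"
  · subst e39; decide
  by_cases e40 : u = "TTR"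
  · subst e40; decide
  by_cases e41 : u = "RBP4"
  · subst e41; decide
  by_cases e42 : u = "AMBP"
  · subst e42; decide
  simp only [PySem.Dict.get?_mk_cons, beq_iff_eq]
  rw [if_neg (fun h => e0 h.symm), if_neg (fun h => e1 h.symm), if_neg (fun h => e2 h.symm), if_neg (fun h => e3 h.symm), if_neg (fun h => e4 h.symm), if_neg (fun h => e5 h.symm), if_neg (fun h => e6 h.symm), if_neg (fun h => e7 h.symm), if_neg (fun h => e8 h.symm), if_neg (fun h => e9 h.symm), if_neg (fun h => e10 h.symm), if_neg (fun h => e11 h.symm), if_neg (fun h => e12 h.symm), if_neg (fun h => e13 h.symm), if_neg (fun h => e14 h.symm), if_neg (fun h => e15 h.symm), if_neg (fun h => e16 h.symm), if_neg (fun h => e17 h.symm), if_neg (fun h => e18 h.symm), if_neg (fun h => e19 h.symm), if_neg (fun h => e20 h.symm), if_neg (fun h => e21 h.symm), if_neg (fun h => e22 h.symm), if_neg (fun h => e23 h.symm), if_neg (fun h => e24 h.symm), if_neg (fun h => e25 h.symm), if_neg (fun h => e26 h.symm), if_neg (fun h => e27 h.symm), if_neg (fun h => e28 h.symm), if_neg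 (fun h => e29 h.symm), if_neg (fun h => e30 h.symm), if_neg (fun h => e31 h.symm), if_neg (fun h => e32 h.symm), if_neg (fun h => e33 h.symm), if_neg (fun h => e34 h.symm), if_neg (fun h => e35 h.symm), if_neg (fun h => e36 h.symm), if_neg (fun h => e37 h.symm), if_neg (fun h => e38 h.symm), if_neg (fun h => e39 h.symm), if_neg (fun h => e40 h.symm), if_neg (fun h => e41 h.symm), if_neg (fun h => e42 h.symm)]
  simp [e0, e1, e2, e3, e4, e5, e6, e7, e8, e9, e10, e11, e12, e13, e14, e15, e16, e17, e18, e19, e20, e21, e22, e23, e24, e25, e26, e27, e28, e29, e30, e31, e32, e33, e34, e35, e36, e37, e38, e39, e40, e41, e42]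
  rfl

theorem pvDisj_pvG0a (u : String) (h : u ∈ pvG0a) : u ∉ pvG0b ∧ u ∉ pvG1 ∧ u ∉ pvG2 ∧ u ∉ pvG3 ∧ u ∉ pvG4 ∧ u ∉ pvG5 ∧ u ∉ pvG6 := by
  simp only [pvG0a, List.mem_cons, List.not_mem_nil, or_false] at h
  rcases h with rfl|rfl|rfl <;> refine ⟨?_, ?_, ?_, ?_, ?_, ?_, ?_⟩ <;> decide

theorem pvDisj_pvG0b (u : String) (h : u ∈ pvG0b) : u ∉ pvG0a ∧ u ∉ pvG1 ∧ u ∉ pvG2 ∧ u ∉ pvG3 ∧ u ∉ pvG4 ∧ u ∉ pvG5 ∧ u ∉ pvG6 := by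
  simp only [pvG0b, List.mem_cons, List.not_mem_nil, or_false] at h
  rcases h with rfl|rfl|rfl|rfl <;> refine ⟨?_, ?_, ?_, ?_, ?_, ?_, ?_⟩ <;> decide

theorem pvDisj_pvG1 (u : String) (h : u ∈ pvG1) : u ∉ pvG0a ∧ u ∉ pvG0b ∧ u ∉ pvG2 ∧ u ∉ pvG3 ∧ u ∉ pvG4 ∧ u ∉ pvG5 ∧ u ∉ pvG6 := by
  simp only [pvG1, List.mem_cons, List.not_mem_nil, or_false] at h
  rcases h with rfl|rfl|rfl|rfl|rfl <;> refine ⟨?_, ?_, ?_, ?_, ?_, ?_, ?_⟩ <;> decide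

theorem pvDisj_pvG2 (u : String) (h : u ∈ pvG2) : u ∉ pvG0a ∧ u ∉ pvG0b ∧ u ∉ pvG1 ∧ u ∉ pvG3 ∧ u ∉ pvG4 ∧ u ∉ pvG5 ∧ u ∉ pvG6 := by
  simp only [pvG2, List.mem_cons, List.not_mem_nil, or_false] at h
  rcases h with rfl|rfl|rfl|rfl|rfl|rfl|rfl <;> refine ⟨?_, ?_, ?_, ?_, ?_, ?_, ?_⟩ <;> decide

theorem pvDisj_pvG3 (u : String) (h : u ∈ pvG3) : u ∉ pvG0a ∧ u ∉ pvG0b ∧ u ∉ pvG1 ∧ u ∉ pvG2 ∧ u ∉ pvG4 ∧ u ∉ pvG5 ∧ u ∉ pvG6 := by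
  simp only [pvG3, List.mem_cons, List.not_mem_nil, or_false] at h
  rcases h with rfl|rfl|rfl|rfl|rfl|rfl <;> refine ⟨?_, ?_, ?_, ?_, ?_, ?_, ?_⟩ <;> decide

theorem pvDisj_pvG4 (u : String) (h : u ∈ pvG4) : u ∉ pvG0a ∧ u ∉ pvG0b ∧ u ∉ pvG1 ∧ u ∉ pvG2 ∧ u ∉ pvG3 ∧ u ∉ pvG5 ∧ u ∉ pvG6 := by
  simp only [pvG4, List.mem_cons, List.not_mem_nil, or_false] at h
  rcases h with rfl|rfl|rfl|rfl|rfl|rfl|rfl <;> refine ⟨?_, ?_, ?_, ?_, ?_, ?_, ?_⟩ <;> decide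

theorem pvDisj_pvG5 (u : String) (h : u ∈ pvG5) : u ∉ pvG0a ∧ u ∉ pvG0b ∧ u ∉ pvG1 ∧ u ∉ pvG2 ∧ u ∉ pvG3 ∧ u ∉ pvG4 ∧ u ∉ pvG6 := by
  simp only [pvG5, List.mem_cons, List.not_mem_nil, or_false] at h
  rcases h with rfl|rfl|rfl|rfl <;> refine ⟨?_, ?_, ?_, ?_, ?_, ?_, ?_⟩ <;> decide

theorem pvDisj_pvG6 (u : String) (h : u ∈ pvG6) : u ∉ pvG0a ∧ u ∉ pvG0b ∧ u ∉ pvG1 ∧ u ∉ pvG2 ∧ u ∉ pvG3 ∧ u ∉ pvG4 ∧ u ∉ pvG5 := by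
  simp only [pvG6, List.mem_cons, List.not_mem_nil, or_false] at h
  rcases h with rfl|rfl|rfl|rfl|rfl|rfl|rfl <;> refine ⟨?_, ?_, ?_, ?_, ?_, ?_, ?_⟩ <;> decide

theorem pvCmin_bounds (l : List String) : 2 ≤ pvCmin l ∧ pvCmin l ≤ 8 := by
  unfold pvCmin; split_ifs <;> omega

set_option maxHeartbeats 3200000 in
theorem pvStep_state (pref : List String) (g : String) : pvStep (pvSt pref) g = pvSt (pref ++ [g]) := by
  unfold pvStep
  rw [pvCODE_get (PySem.Str.upper g)]
  by_cases h0 : PySem.Str.upper g ∈ pvG0a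
  · obtain ⟨hd0, hd1, hd2, hd3, hd4, hd5, hd6⟩ := pvDisj_pvG0a _ h0
    rw [if_pos h0]
    have hb := pvCmin_bounds pref
    simp only [pvSt, pvCmin, pvAny_append, h0, hd0, hd1, hd2, hd3, hd4, hd5, hd6]
    norm_num
  by_cases h1 : PySem.Str.upper g ∈ pvG0b
  · obtain ⟨hd0, hd1, hd2, hd3, hd4, hd5, hd6⟩ := pvDisj_pvG0b _ h1
    rw [if_neg h0, if_pos h1]
    have hb := pvCmin_bounds pref
    simp only [pvSt, pvCmin, pvAny_append, h1, hd0, hd1, hd2, hd3, hd4, hd5, hd6]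
    norm_num
  by_cases h2 : PySem.Str.upper g ∈ pvG1
  · obtain ⟨hd0, hd1, hd2, hd3, hd4, hd5, hd6⟩ := pvDisj_pvG1 _ h2
    rw [if_neg h0, if_neg h1, if_pos h2]
    have hb := pvCmin_bounds pref
    simp only [pvSt, pvCmin, pvAny_append, h2, hd0, hd1, hd2, hd3, hd4, hd5, hd6]
    norm_num
    all_goals split_ifs <;> simp_all
  by_cases h3 : PySem.Str.upper g ∈ pvG2
  · obtain ⟨hd0, hd1, hd2, hd3, hd4, hd5, hd6⟩ := pvDisj_pvG2 _ h3
    rw [if_neg h0, if_neg h1, if_neg h2, if_pos h3]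
    have hb := pvCmin_bounds pref
    simp only [pvSt, pvCmin, pvAny_append, h3, hd0, hd1, hd2, hd3, hd4, hd5, hd6]
    norm_num
    all_goals split_ifs <;> simp_all
  by_cases h4 : PySem.Str.upper g ∈ pvG3
  · obtain ⟨hd0, hd1, hd2, hd3, hd4, hd5, hd6⟩ := pvDisj_pvG3 _ h4
    rw [if_neg h0, if_neg h1, if_neg h2, if_neg h3, if_pos h4]
    have hb := pvCmin_bounds pref
    simp only [pvSt, pvCmin, pvAny_append, h4, hd0, hd1, hd2, hd3, hd4, hd5, hd6]
    norm_num
    all_goals split_ifs <;> simp_all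
  by_cases h5 : PySem.Str.upper g ∈ pvG4
  · obtain ⟨hd0, hd1, hd2, hd3, hd4, hd5, hd6⟩ := pvDisj_pvG4 _ h5
    rw [if_neg h0, if_neg h1, if_neg h2, if_neg h3, if_neg h4, if_pos h5]
    have hb := pvCmin_bounds pref
    simp only [pvSt, pvCmin, pvAny_append, h5, hd0, hd1, hd2, hd3, hd4, hd5, hd6]
    norm_num
    all_goals split_ifs <;> simp_all
  by_cases h6 : PySem.Str.upper g ∈ pvG5
  · obtain ⟨hd0, hd1, hd2, hd3, hd4, hd5, hd6⟩ := pvDisj_pvG5 _ h6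
    rw [if_neg h0, if_neg h1, if_neg h2, if_neg h3, if_neg h4, if_neg h5, if_pos h6]
    have hb := pvCmin_bounds pref
    simp only [pvSt, pvCmin, pvAny_append, h6, hd0, hd1, hd2, hd3, hd4, hd5, hd6]
    norm_num
    all_goals split_ifs <;> simp_all
  by_cases h7 : PySem.Str.upper g ∈ pvG6
  · obtain ⟨hd0, hd1, hd2, hd3, hd4, hd5, hd6⟩ := pvDisj_pvG6 _ h7
    rw [if_neg h0, if_neg h1, if_neg h2, if_neg h3, if_neg h4, if_neg h5, if_neg h6, if_pos h7]
    have hb := pvCmin_bounds pref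
    simp only [pvSt, pvCmin, pvAny_append, h7, hd0, hd1, hd2, hd3, hd4, hd5, hd6]
    norm_num
    all_goals split_ifs <;> simp_all
  -- no group matched
  rw [if_neg h0, if_neg h1, if_neg h2, if_neg h3, if_neg h4, if_neg h5, if_neg h6, if_neg h7]
  simp only [pvSt, pvCmin, pvAny_append, h0, h1, h2, h3, h4, h5, h6, h7]
  norm_num

theorem pvFold_state (gs : List String) (pref : List String) :
    gs.foldl pvStep (pvSt pref) = pvSt (pref ++ gs) := by
  induction gs generalizing pref with
  | nil => simp
  | cons g gs ih =>
    simp only [List.foldl_cons, pvStep_state]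
    rw [ih (pref ++ [g])]
    simp

theorem pvHit_eq (lits : List String) (genes : List String) :
    pvHit lits (PySem.Set.ofList (genes.map PySem.Str.upper)) = pvAny lits genes := by
  rw [Bool.eq_iff_iff]
  simp only [pvHit, pvAny]
  simp only [Bool.not_eq_eq_eq_not, Bool.not_true, List.any_eq_true, decide_eq_true_eq]
  constructor
  · intro h
    obtain ⟨y, hy⟩ := List.exists_mem_of_ne_nil _ (List.isEmpty_eq_false_iff.mp h)
    obtain ⟨h1, h2⟩ := (PySem.Set.mem_inter _ _ _).mp hy
    obtain ⟨g, hg, rfl⟩ := List.mem_map.mp ((PySem.Set.mem_ofList _ _).mp h2)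
    exact ⟨g, hg, (PySem.Set.mem_ofList _ _).mp h1⟩
  · rintro ⟨g, hg, hmem⟩
    rw [List.isEmpty_eq_false_iff]
    intro h
    have : PySem.Str.upper g ∈ PySem.Set.inter (PySem.Set.ofList lits)
        (PySem.Set.ofList (genes.map PySem.Str.upper)) :=
      (PySem.Set.mem_inter _ _ _).mpr ⟨(PySem.Set.mem_ofList _ _).mpr hmem,
        (PySem.Set.mem_ofList _ _).mpr (List.mem_map.mpr ⟨g, hg, rfl⟩)⟩
    rw [h] at this
    exact absurd this (List.not_mem_nil)
-- ===== VERDICT (by name: the statement is the Claim_ definition above) =====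
set_option maxHeartbeats 1600000 in
theorem annotate_program_spec : Claim_equal_annotate_program := by
  intro ct genes _
  unfold Spec_annotate_program
  simp only [annotate_program, annotate_program_alt]
  rw [show ((false, false, (8:Int)) : Bool × Bool × Int) = pvSt [] from rfl,
    pvFold_state genes [], List.nil_append]
  simp only [pvHit_eq, pvSt, pvCmin]
  simp only [pvG0a, pvG0b, pvG1, pvG2, pvG3, pvG4, pvG5, pvG6]
  by_cases hb0 : pvAny ["ACTA2", "TAGLN", "MYL9"] genes = true <;>
    by_cases hb1 : pvAny ["CALD1", "TPM2", "IGFBP7", "VIM"] genes = true <;>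
    by_cases hb2 : pvAny ["COL1A1", "COL1A2", "COL3A1", "DCN", "LUM"] genes = true <;>
    by_cases hb3 : pvAny ["SAA1", "SAA2", "HP", "ORM1", "SERPINA1", "FGA", "FGB"] genes = true <;>
    by_cases hb4 : pvAny ["CYP3A5", "CYP2A7", "SLC22A7", "MLXIPL", "APOB", "FTCD"] genes = true <;>
    by_cases hb5 : pvAny ["HLA-A", "HLA-B", "HLA-C", "SRGN", "IL32", "TMSB10", "TMSB4X"] genes = true <;>
    by_cases hb6 : pvAny ["IGKC", "JCHAIN", "IGHG1", "IGHA1"] genes = true <;>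
    by_cases hb7 : pvAny ["ALB", "APOA1", "APOA2", "APOC3", "TTR", "RBP4", "AMBP"] genes = true <;>
    simp [hb0, hb1, hb2, hb3, hb4, hb5, hb6, hb7] <;> decide
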